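-- pv_equiv track=rewrite | github.com/victorpuello/kampus | backend/academic/commission_views.py | _format_commitments_for_observer
-- ===== SOURCE A (Python) =====
-- def _format_commitments_for_observer(payload: dict[str, list[str]]) -> str:
--     sections = [
--         ("Compromisos del estudiante", payload.get("student_commitments") or []),
--         ("Compromisos del acudiente", payload.get("guardian_commitments") or []),
--         ("Compromisos de la institución", payload.get("institution_commitments") or []),
--     ]
--
--     lines: list[str] = []
--     for title, items in sections:
--         clean_items = [str(item).strip() for item in items if str(item).strip()]
--         if not clean_items:
--             continue
--         lines.append(f"{title}:")
--         lines.extend([f"- {item}" for item in clean_items])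
--         lines.append("")
--
--     return "\n".join(lines).strip()
-- ===== SOURCE B (Python) =====
-- def _format_commitments_for_observer(payload: dict[str, list[str]]) -> str:
--     def items_text(items: list[str]) -> str:
--         # recursively build the "\n- x" suffix text; "" when no item survives stripping
--         if not items:
--             return ""
--         head = str(items[0]).strip()
--         rest = items_text(items[1:])
--         return rest if not head else "\n- " + head + rest
--
--     def sections_text(specs) -> str:
--         if not specs:
--             return ""
--         (title, key), tail = specs[0], specs[1:]
--         rest = sections_text(tail)
--         body = items_text(payload.get(key) or [])
--         if not body:
--             return rest
--         block = title + ":" + body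
--         return block if not rest else block + "\n\n" + rest
--
--     return sections_text([
--         ("Compromisos del estudiante", "student_commitments"),
--         ("Compromisos del acudiente", "guardian_commitments"),
--         ("Compromisos de la institución", "institution_commitments"),
--     ])
-- ===== Notes on version B (the rewrite author's own statement) =====
-- stated objective: alternative
-- what changed: A accumulates a flat list of lines with empty-string sentinels after each section and then joins with '\n' and strips the result; B builds no intermediate lists at all: it recursively concatenates each kept item as a '\n- item' string suffix and recursively folds the three sections right-to-left, inserting '\n\n' only between non-empty blocks, so no sentinel, no join and no final strip are needed.
import Mathlib
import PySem

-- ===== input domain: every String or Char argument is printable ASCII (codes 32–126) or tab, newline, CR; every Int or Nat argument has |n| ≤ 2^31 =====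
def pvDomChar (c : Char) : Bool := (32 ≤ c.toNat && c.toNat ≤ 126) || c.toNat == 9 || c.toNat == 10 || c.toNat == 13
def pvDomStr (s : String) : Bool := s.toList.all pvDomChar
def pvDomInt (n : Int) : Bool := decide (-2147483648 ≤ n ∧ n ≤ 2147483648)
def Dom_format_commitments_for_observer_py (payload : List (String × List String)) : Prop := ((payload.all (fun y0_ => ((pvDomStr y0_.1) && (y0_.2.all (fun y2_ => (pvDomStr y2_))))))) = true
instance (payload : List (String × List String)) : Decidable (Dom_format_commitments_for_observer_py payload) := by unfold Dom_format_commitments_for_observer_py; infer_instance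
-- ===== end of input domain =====

-- B replaces A's flat line accumulator with empty-string sentinels, "\n"-join and final strip by
-- direct recursive string building: items become a "\n- item" suffix string, sections are folded
-- right-to-left with "\n\n" inserted only between non-empty blocks (same result, different
-- decomposition; not claimed faster).

-- payload.get(k) or [] : first-match association-list lookup, [] when absent (shared dict helper)
def pvGet (payload : List (String × List String)) (k : String) : List String :=
  ((payload.find? (fun kv => kv.1 == k)).map Prod.snd).getD []

-- ===== PORT A =====
def format_commitments_for_observer_py (payload : List (String × List String)) : String :=
  let sections : List (String × List String) :=
    [("Compromisos del estudiante", pvGet payload "student_commitments"),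
     ("Compromisos del acudiente", pvGet payload "guardian_commitments"),
     ("Compromisos de la institución", pvGet payload "institution_commitments")]
  let lines : List String :=
    sections.foldl (fun lines ti =>
      let clean_items : List String :=
        List.map PySem.Str.strip (List.filter (fun it => !(PySem.Str.strip it == "")) ti.2)
      if clean_items = [] then lines
      else lines ++ ([ti.1 ++ ":"] ++ (List.map (fun it => "- " ++ it) clean_items ++ [""]))) []
  PySem.Str.strip (PySem.Str.join "\n" lines)

-- ===== PORT B =====
-- items_text: recursive "\n- item" suffix string over the raw items
def pvItemsText : List String → String
  | [] => ""
  | x :: t =>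
    let head := PySem.Str.strip x
    let rest := pvItemsText t
    if head == "" then rest else "\n- " ++ head ++ rest

-- sections_text: right-to-left recursion over (title, key) specs
def pvSectionsText (payload : List (String × List String)) : List (String × String) → String
  | [] => ""
  | tk :: tail =>
    let rest := pvSectionsText payload tail
    let body := pvItemsText (pvGet payload tk.2)
    if body == "" then rest
    else
      let block := tk.1 ++ ":" ++ body
      if rest == "" then block else block ++ "\n\n" ++ rest

def format_commitments_for_observer_py_alt (payload : List (String × List String)) : String :=
  pvSectionsText payload
    [("Compromisos del estudiante", "student_commitments"),
     ("Compromisos del acudiente", "guardian_commitments"),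
     ("Compromisos de la institución", "institution_commitments")]

-- ===== PRECONDITION & SPEC =====
def Spec_format_commitments_for_observer_py (payload : List (String × List String)) (out : String) : Prop := out = format_commitments_for_observer_py_alt payload
instance (payload : List (String × List String)) (out : String) : Decidable (Spec_format_commitments_for_observer_py payload out) := by unfold Spec_format_commitments_for_observer_py; infer_instance

-- ===== CLAIM (what is proved, stated in full; the proofs are below) =====
def Claim_equal_format_commitments_for_observer_py : Prop := ∀ (payload : List (String × List String)), Dom_format_commitments_for_observer_py payload → Spec_format_commitments_for_observer_py payload (format_commitments_for_observer_py payload)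

-- ===== LEMMAS AND PROOFS =====

-- cleaned items of one section (A's filter-then-map is bridged by List.filter_map)
def pvClean (l : List String) : List String :=
  List.filter (fun s => !(s == "")) (List.map PySem.Str.strip l)

-- the flat lines A contributes for one section, and the block B contributes
def secLines (s : String × List String) : List String :=
  if s.2 = [] then []
  else [s.1 ++ ":"] ++ (List.map (fun it => "- " ++ it) s.2 ++ [""])

def secBlock (s : String × List String) : Option String :=
  if s.2 = [] then none
  else some (s.1 ++ ":\n" ++ PySem.Str.join "\n" (List.map (fun it => "- " ++ it) s.2))

-- a chars string that is nonempty and starts and ends with a non-space character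
def GoodC (cs : List Char) : Prop :=
  cs ≠ [] ∧ PySem.Chars.isspace (cs.headD 'x') = false ∧ PySem.Chars.isspace (cs.getLastD 'x') = false

-- ---- small list utilities ----
lemma getLastD_eq_getLast?_getD {α : Type} (l : List α) (d : α) : l.getLastD d = l.getLast?.getD d := by
  cases l <;> simp

lemma headD_append_left {α : Type} (a z : List α) (d : α) (h : a ≠ []) :
    (a ++ z).headD d = a.headD d := by
  cases a with
  | nil => exact absurd rfl h
  | cons x t => simp

lemma getLastD_append_right {α : Type} (a z : List α) (d : α) (h : z ≠ []) :
    (a ++ z).getLastD d = z.getLastD d := by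
  simp [List.getLast?_append]
  cases hz : z.getLast? with
  | none => exact absurd (List.getLast?_eq_none_iff.mp hz) h
  | some c => simp

lemma getLastD_reverse {α : Type} (l : List α) (d : α) : l.reverse.getLastD d = l.headD d := by
  simp [List.getLast?_reverse]

lemma dropWhile_headD {α : Type} (p : α → Bool) (l : List α) (d : α)
    (h : l.dropWhile p ≠ []) : p ((l.dropWhile p).headD d) = false := by
  induction l with
  | nil => exact absurd rfl h
  | cons a t ih =>
    by_cases ha : p a
    · rw [List.dropWhile_cons_of_pos ha] at h ⊢; exact ih h
    · rw [List.dropWhile_cons_of_neg ha]; simpa using Bool.of_not_eq_true ha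

-- ---- join lemmas at the Chars level ----
lemma jc_cons (sep x : List Char) (xs : List (List Char)) :
    PySem.Chars.join sep (x :: xs) = x ++ (if xs = [] then [] else sep ++ PySem.Chars.join sep xs) := by
  cases xs with
  | nil => simp [PySem.Chars.join, List.intercalate, List.intersperse]
  | cons b t => simp [PySem.Chars.join, List.intercalate, List.intersperse]

lemma jc_append (sep : List Char) (xs ys : List (List Char)) (h : xs ≠ []) :
    PySem.Chars.join sep (xs ++ ys) =
      PySem.Chars.join sep xs ++ (if ys = [] then [] else sep ++ PySem.Chars.join sep ys) := by
  induction xs with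
  | nil => exact absurd rfl h
  | cons x t ih =>
    cases t with
    | nil => simp [jc_cons]
    | cons b r =>
      have ht : (b :: r : List (List Char)) ≠ [] := by simp
      rw [List.cons_append, jc_cons, ih ht, jc_cons sep x (b :: r)]
      by_cases hy : ys = []
      · simp [hy]
      · have : (b :: r) ++ ys ≠ [] := by simp
        simp [hy, List.append_assoc]

lemma jc_good (sep : List Char) : ∀ xs : List (List Char), xs ≠ [] → (∀ x ∈ xs, GoodC x) →
    GoodC (PySem.Chars.join sep xs) := by
  intro xs
  induction xs with
  | nil => intro h; exact absurd rfl h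
  | cons x t ih =>
    intro _ hall
    have hx : GoodC x := hall x (by simp)
    obtain ⟨hxne, hxh, hxl⟩ := hx
    cases t with
    | nil => simpa [jc_cons] using ⟨hxne, hxh, hxl⟩
    | cons b r =>
      have ht : (b :: r : List (List Char)) ≠ [] := by simp
      have hJ : GoodC (PySem.Chars.join sep (b :: r)) :=
        ih ht (fun y hy => hall y (by simp [hy]))
      obtain ⟨hJne, _, hJl⟩ := hJ
      rw [jc_cons]
      have hne2 : sep ++ PySem.Chars.join sep (b :: r) ≠ [] := by
        intro hcontr
        exact hJne (by simpa using (List.append_eq_nil_iff.mp hcontr).2)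
      refine ⟨?_, ?_, ?_⟩
      · simp only [if_neg (by simp : ¬ (b :: r : List (List Char)) = [])]
        intro hcontr
        exact hxne ((List.append_eq_nil_iff.mp hcontr).1)
      · rw [if_neg (by simp : ¬ (b :: r : List (List Char)) = []),
          headD_append_left _ _ _ hxne]; exact hxh
      · rw [if_neg (by simp : ¬ (b :: r : List (List Char)) = []),
          getLastD_append_right _ _ _ hne2, getLastD_append_right _ _ _ hJne]
        exact hJl

-- ---- strip lemmas ----
lemma chars_strip_nil : PySem.Chars.strip [] = [] := by
  simp [PySem.Chars.strip, PySem.Chars.lstrip, PySem.Chars.rstrip]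

lemma strip_append_newline (cs : List Char) (h : GoodC cs) :
    PySem.Chars.strip (cs ++ ['\n']) = cs := by
  obtain ⟨hne, hh, hl⟩ := h
  cases cs with
  | nil => exact absurd rfl hne
  | cons a t =>
    have ha : PySem.Chars.isspace a = false := by simpa using hh
    unfold PySem.Chars.strip PySem.Chars.lstrip PySem.Chars.rstrip
    rw [List.cons_append, List.dropWhile_cons_of_neg (by simp [ha])]
    have hsplit : a :: (t ++ ['\n']) = (a :: t) ++ ['\n'] := by simp
    rw [hsplit, List.reverse_append]
    have h1 : (['\n'] : List Char).reverse = ['\n'] := rfl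
    rw [h1, List.singleton_append,
      List.dropWhile_cons_of_pos (by decide : PySem.Chars.isspace '\n' = true)]
    cases hr : (a :: t).reverse with
    | nil => exact absurd hr (by simp)
    | cons b r' =>
      have hb : PySem.Chars.isspace b = false := by
        have hgl : (a :: t).getLastD 'x' = b := by
          rw [getLastD_eq_getLast?_getD, ← List.head?_reverse, hr]
          rfl
        rw [← hgl]; exact hl
      rw [List.dropWhile_cons_of_neg (by simp [hb]), ← hr, List.reverse_reverse]

lemma strip_good (x : String) (h : ¬ (PySem.Str.strip x = "")) :
    GoodC (PySem.Str.strip x).toList := by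
  have hne : (PySem.Str.strip x).toList ≠ [] := by
    intro hc
    exact h (String.toList_inj.mp (by simpa using hc))
  rw [PySem.Str.toList_strip] at hne ⊢
  set cs := x.toList with hcs
  refine ⟨hne, ?_, ?_⟩
  · have hsfx : List.dropWhile PySem.Chars.isspace (PySem.Chars.lstrip cs).reverse
        <:+ (PySem.Chars.lstrip cs).reverse := List.dropWhile_suffix _
    have hrw : List.dropWhile PySem.Chars.isspace (PySem.Chars.lstrip cs).reverse
        = (PySem.Chars.strip cs).reverse := by
      simp [PySem.Chars.strip, PySem.Chars.rstrip]
    rw [hrw] at hsfx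
    have hpre : PySem.Chars.strip cs <+: PySem.Chars.lstrip cs := List.reverse_suffix.mp hsfx
    obtain ⟨r, hr⟩ := hpre
    have hlne : PySem.Chars.lstrip cs ≠ [] := by
      intro hc; rw [hc] at hr
      exact hne (List.append_eq_nil_iff.mp hr).1
    have h1 : (PySem.Chars.lstrip cs).headD 'x' = (PySem.Chars.strip cs).headD 'x' := by
      rw [← hr]; exact headD_append_left _ _ _ hne
    have h2 : PySem.Chars.isspace ((PySem.Chars.lstrip cs).headD 'x') = false :=
      dropWhile_headD _ _ _ hlne
    rw [← h1]; exact h2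
  · have hrw : PySem.Chars.strip cs
        = (List.dropWhile PySem.Chars.isspace (PySem.Chars.lstrip cs).reverse).reverse := by
      simp [PySem.Chars.strip, PySem.Chars.rstrip]
    rw [hrw, getLastD_reverse]
    apply dropWhile_headD
    intro hc
    rw [hrw] at hne
    exact hne (by simp [hc])

-- elements of a cleaned list are good
lemma pvClean_elem (l : List String) (s : String) (hs : s ∈ pvClean l) : GoodC s.toList := by
  unfold pvClean at hs
  obtain ⟨hmem, hcond⟩ := List.mem_filter.mp hs
  obtain ⟨x, _, hx⟩ := List.mem_map.mp hmem
  subst hx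
  exact strip_good x (by simpa using hcond)

-- a block built from a good title and nonempty cleaned items is good
lemma secBlock_good (t : String) (c : List String)
    (htne : t.toList ≠ []) (hth : PySem.Chars.isspace (t.toList.headD 'x') = false)
    (hcne : c ≠ []) (hc : ∀ s ∈ c, GoodC s.toList) :
    GoodC (t ++ ":\n" ++ PySem.Str.join "\n" (List.map (fun it => "- " ++ it) c)).toList := by
  have hmapgood : ∀ y ∈ List.map String.toList (List.map (fun it => "- " ++ it) c), GoodC y := by
    intro y hy
    obtain ⟨z, hz, hzy⟩ := List.mem_map.mp hy
    obtain ⟨s, hsmem, hsz⟩ := List.mem_map.mp hz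
    subst hzy; subst hsz
    obtain ⟨hsne, _, hsl⟩ := hc s hsmem
    refine ⟨by simp, ?_, ?_⟩
    · have : ("- " ++ s).toList = '-' :: ' ' :: s.toList := by simp
      rw [this]
      show PySem.Chars.isspace '-' = false
      decide
    · have : ("- " ++ s).toList = ['-', ' '] ++ s.toList := by simp
      rw [this, getLastD_append_right _ _ _ hsne]; exact hsl
  have hmne : List.map String.toList (List.map (fun it => "- " ++ it) c) ≠ [] := by
    simpa using hcne
  have hJ : GoodC (PySem.Chars.join ['\n']
      (List.map String.toList (List.map (fun it => "- " ++ it) c))) :=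
    jc_good _ _ hmne hmapgood
  obtain ⟨hJne, _, hJl⟩ := hJ
  have htl : (t ++ ":\n" ++ PySem.Str.join "\n" (List.map (fun it => "- " ++ it) c)).toList
      = t.toList ++ ([':', '\n'] ++ PySem.Chars.join ['\n']
          (List.map String.toList (List.map (fun it => "- " ++ it) c))) := by
    simp [PySem.Str.toList_join, List.append_assoc]
  rw [htl]
  refine ⟨by simp [htne], ?_, ?_⟩
  · rw [headD_append_left _ _ _ htne]; exact hth
  · rw [getLastD_append_right _ _ _ (by simp), getLastD_append_right _ _ _ hJne]
    exact hJl

-- the section line lists and blocks vanish together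
lemma secE : ∀ SB : List (String × List String),
    (SB.flatMap secLines = [] ↔ SB.filterMap secBlock = []) := by
  intro SB
  induction SB with
  | nil => simp
  | cons s t ih =>
    by_cases hc : s.2 = [] <;> simp [secLines, secBlock, hc, ih]

-- Str-level join helpers
lemma js_single (sep : String) (x : String) :
    (PySem.Str.join sep [x]).toList = x.toList := by
  rw [PySem.Str.toList_join]
  simp [jc_cons]

lemma js_append (xs ys : List String) (h : xs ≠ []) :
    (PySem.Str.join "\n" (xs ++ ys)).toList
      = (PySem.Str.join "\n" xs).toList
        ++ (if ys = [] then [] else '\n' :: (PySem.Str.join "\n" ys).toList) := by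
  have hx : List.map String.toList xs ≠ [] := by simpa using h
  rw [PySem.Str.toList_join, List.map_append, jc_append _ _ _ hx]
  by_cases hy : ys = []
  · simp [hy, PySem.Str.toList_join]
  · have hy' : List.map String.toList ys ≠ [] := by simpa using hy
    rw [if_neg hy', if_neg hy, ← PySem.Str.toList_join]
    have hsep : ("\n".toList : List Char) = ['\n'] := by decide
    rw [hsep]
    simp

lemma js_cons (x : String) (xs : List String) :
    (PySem.Str.join "\n" (x :: xs)).toList
      = x.toList ++ (if xs = [] then [] else '\n' :: (PySem.Str.join "\n" xs).toList) := by
  have h : (x :: xs) = [x] ++ xs := rfl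
  rw [h, js_append _ _ (by simp), js_single]

lemma js2_cons (x : String) (xs : List String) (h : xs ≠ []) :
    (PySem.Str.join "\n\n" (x :: xs)).toList
      = x.toList ++ '\n' :: '\n' :: (PySem.Str.join "\n\n" xs).toList := by
  have hx : List.map String.toList xs ≠ [] := by simpa using h
  rw [PySem.Str.toList_join, List.map_cons, jc_cons, if_neg hx, ← PySem.Str.toList_join]
  have hsep : ("\n\n".toList : List Char) = ['\n', '\n'] := by decide
  rw [hsep]
  simp

-- the "\n"-join of one section's lines is its block followed by '\n'
lemma headJoin (t : String) (c : List String) (hc : c ≠ []) :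
    (PySem.Str.join "\n" ([t ++ ":"] ++ (List.map (fun it => "- " ++ it) c ++ [""]))).toList
      = (t ++ ":\n" ++ PySem.Str.join "\n" (List.map (fun it => "- " ++ it) c)).toList ++ ['\n'] := by
  have hm : List.map (fun it => "- " ++ it) c ≠ [] := by simpa using hc
  rw [js_append _ _ (by simp), js_append _ _ hm, if_neg (by simp : ¬ (List.map (fun it => "- " ++ it) c ++ [""] : List String) = []), if_neg (by simp : ¬ ([""] : List String) = [])]
  rw [js_single, js_single]
  have h0 : ("" : String).toList = [] := by decide
  have h1 : (t ++ ":").toList = t.toList ++ [':'] := by simp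
  have h2 : (t ++ ":\n" ++ PySem.Str.join "\n" (List.map (fun it => "- " ++ it) c)).toList
      = t.toList ++ [':', '\n'] ++ (PySem.Str.join "\n" (List.map (fun it => "- " ++ it) c)).toList := by
    simp
  rw [h0, h1, h2]
  simp [List.append_assoc]

-- main shape lemma: A's flat "\n"-join with sentinels = the "\n\n"-join of blocks plus one '\n'
lemma mainJoin : ∀ SB : List (String × List String),
    (PySem.Str.join "\n" (SB.flatMap secLines)).toList
      = if SB.filterMap secBlock = [] then []
        else (PySem.Str.join "\n\n" (SB.filterMap secBlock)).toList ++ ['\n'] := by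
  intro SB
  induction SB with
  | nil => simp [PySem.Str.toList_join]
  | cons s SB ih =>
    by_cases hc : s.2 = []
    · have h1 : List.flatMap secLines (s :: SB) = List.flatMap secLines SB := by
        simp [List.flatMap_cons, secLines, hc]
      have h2 : List.filterMap secBlock (s :: SB) = List.filterMap secBlock SB := by
        simp [secBlock, hc]
      rw [h1, h2]
      exact ih
    · have h1 : List.flatMap secLines (s :: SB)
          = ([s.1 ++ ":"] ++ (List.map (fun it => "- " ++ it) s.2 ++ [""]))
              ++ List.flatMap secLines SB := by
        simp [List.flatMap_cons, secLines, hc]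
      have h2 : List.filterMap secBlock (s :: SB)
          = (s.1 ++ ":\n" ++ PySem.Str.join "\n" (List.map (fun it => "- " ++ it) s.2))
              :: List.filterMap secBlock SB := by
        simp [secBlock, hc]
      rw [h1, h2]
      rw [js_append _ _ (by simp), headJoin s.1 s.2 hc]
      have hcons : ((s.1 ++ ":\n" ++ PySem.Str.join "\n" (List.map (fun it => "- " ++ it) s.2))
          :: List.filterMap secBlock SB) ≠ [] := by simp
      rw [if_neg hcons]
      by_cases hB : SB.filterMap secBlock = []
      · have hF : SB.flatMap secLines = [] := (secE SB).mpr hB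
        rw [hF, hB]
        simp
      · have hF : SB.flatMap secLines ≠ [] := fun hcontr => hB ((secE SB).mp hcontr)
        rw [if_neg hF, ih, if_neg hB, js2_cons _ _ hB]
        simp [List.append_assoc]

-- A's filter-then-map cleaning equals map-then-filter cleaning
lemma cleanA_eq (l : List String) :
    List.map PySem.Str.strip (List.filter (fun it => !(PySem.Str.strip it == "")) l) = pvClean l := by
  unfold pvClean
  rw [List.filter_map]
  rfl

-- blocks actually produced are good (titles are nonempty, start with 'C')
lemma block_mem_good (payload : List (String × List String)) (b : String)
    (hb : b ∈ List.filterMap secBlock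
      [("Compromisos del estudiante", pvClean (pvGet payload "student_commitments")),
       ("Compromisos del acudiente", pvClean (pvGet payload "guardian_commitments")),
       ("Compromisos de la institución", pvClean (pvGet payload "institution_commitments"))]) :
    GoodC b.toList := by
  obtain ⟨sec, hsec, hval⟩ := List.mem_filterMap.mp hb
  have hgen : ∀ (t : String) (l : List String),
      t.toList ≠ [] → PySem.Chars.isspace (t.toList.headD 'x') = false →
      secBlock (t, pvClean l) = some b → GoodC b.toList := by
    intro t l htne hth hsb
    unfold secBlock at hsb
    by_cases hcl : pvClean l = []
    · simp [hcl] at hsb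
    · rw [if_neg hcl] at hsb
      have := secBlock_good t (pvClean l) htne hth hcl (fun s hs => pvClean_elem l s hs)
      simpa [← Option.some_inj.mp hsb] using this
  simp only [List.mem_cons] at hsec
  rcases hsec with h | h | h | h
  · subst h; exact hgen _ _ (by decide) (by decide) hval
  · subst h; exact hgen _ _ (by decide) (by decide) hval
  · subst h; exact hgen _ _ (by decide) (by decide) hval
  · exact absurd h (by simp)

-- A reduced to the section abstraction
lemma portA_eq (payload : List (String × List String)) :
    format_commitments_for_observer_py payload
      = PySem.Str.strip (PySem.Str.join "\n" (List.flatMap secLines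
          [("Compromisos del estudiante", pvClean (pvGet payload "student_commitments")),
           ("Compromisos del acudiente", pvClean (pvGet payload "guardian_commitments")),
           ("Compromisos de la institución", pvClean (pvGet payload "institution_commitments"))])) := by
  unfold format_commitments_for_observer_py
  simp only [List.foldl_cons, List.foldl_nil, List.flatMap_cons, List.flatMap_nil, secLines,
    cleanA_eq, List.nil_append, List.append_nil]
  by_cases h1 : pvClean (pvGet payload "student_commitments") = [] <;>
    by_cases h2 : pvClean (pvGet payload "guardian_commitments") = [] <;>
      by_cases h3 : pvClean (pvGet payload "institution_commitments") = [] <;>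
        simp [h1, h2, h3, List.append_assoc]

-- ---- B-side lemmas ----

-- B's item recursion builds exactly '\n' followed by the "\n"-join of "- item" lines
lemma pvItemsText_toList (l : List String) :
    (pvItemsText l).toList
      = if pvClean l = [] then []
        else '\n' :: (PySem.Str.join "\n" (List.map (fun it => "- " ++ it) (pvClean l))).toList := by
  induction l with
  | nil => simp [pvItemsText, pvClean]
  | cons x t ih =>
    have hcl : pvClean (x :: t)
        = if PySem.Str.strip x == "" then pvClean t else PySem.Str.strip x :: pvClean t := by
      unfold pvClean
      by_cases hx : PySem.Str.strip x == "" <;> simp_all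
    by_cases hx : PySem.Str.strip x == ""
    · rw [hcl, if_pos hx]
      simpa [pvItemsText, hx] using ih
    · rw [hcl, if_neg hx]
      have hlhs : (pvItemsText (x :: t)).toList
          = ['\n', '-', ' '] ++ (PySem.Str.strip x).toList ++ (pvItemsText t).toList := by
        simp [pvItemsText, hx]
      rw [hlhs, ih]
      rw [if_neg (by simp : ¬ (PySem.Str.strip x :: pvClean t : List String) = [])]
      rw [List.map_cons, js_cons]
      by_cases ht : pvClean t = []
      · simp [ht]
      · have hm : List.map (fun it => "- " ++ it) (pvClean t) ≠ [] := by simpa using ht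
        rw [if_neg ht, if_neg hm]
        simp

-- blocks produced from any section specs are nonempty as char lists (they contain ':')
lemma secBlock_toList_ne (t : String) (c : List String) (b : String)
    (hsb : secBlock (t, c) = some b) : b.toList ≠ [] := by
  unfold secBlock at hsb
  by_cases hc : c = []
  · simp [hc] at hsb
  · rw [if_neg hc] at hsb
    rw [← Option.some_inj.mp hsb]
    simp

-- B's section recursion computes the "\n\n"-join of the blocks
lemma pvSectionsText_toList (payload : List (String × List String)) :
    ∀ specs : List (String × String),
      (pvSectionsText payload specs).toList
        = (PySem.Str.join "\n\n" (List.filterMap secBlock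
            (specs.map (fun tk => (tk.1, pvClean (pvGet payload tk.2)))))).toList := by
  intro specs
  induction specs with
  | nil => simp [pvSectionsText, PySem.Str.toList_join]
  | cons tk tail ih =>
    have hbody := pvItemsText_toList (pvGet payload tk.2)
    by_cases hc : pvClean (pvGet payload tk.2) = []
    · have hbe : pvItemsText (pvGet payload tk.2) == "" := by
        have : (pvItemsText (pvGet payload tk.2)).toList = [] := by rw [hbody, if_pos hc]
        simpa using String.toList_inj.mp (by simpa using this)
      have h2 : List.filterMap secBlock
          ((tk :: tail).map (fun tk => (tk.1, pvClean (pvGet payload tk.2))))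
          = List.filterMap secBlock (tail.map (fun tk => (tk.1, pvClean (pvGet payload tk.2)))) := by
        simp [secBlock, hc]
      rw [h2, ← ih]
      simp [pvSectionsText, hbe]
    · -- body nonempty: block contributed
      have hbne : ¬ (pvItemsText (pvGet payload tk.2) == "") := by
        intro hcontr
        have : (pvItemsText (pvGet payload tk.2)).toList = [] := by
          simp [eq_of_beq hcontr]
        rw [hbody, if_neg hc] at this
        exact absurd this (by simp)
      have hblock : (tk.1 ++ ":" ++ pvItemsText (pvGet payload tk.2)).toList
          = (tk.1 ++ ":\n" ++ PySem.Str.join "\n"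
              (List.map (fun it => "- " ++ it) (pvClean (pvGet payload tk.2)))).toList := by
        rw [String.toList_append, String.toList_append, hbody, if_neg hc]
        simp [List.append_assoc]
      have h2 : List.filterMap secBlock
          ((tk :: tail).map (fun tk => (tk.1, pvClean (pvGet payload tk.2))))
          = (tk.1 ++ ":\n" ++ PySem.Str.join "\n"
              (List.map (fun it => "- " ++ it) (pvClean (pvGet payload tk.2))))
            :: List.filterMap secBlock (tail.map (fun tk => (tk.1, pvClean (pvGet payload tk.2)))) := by
        simp [secBlock, hc]
      rw [h2]
      by_cases hrest : List.filterMap secBlock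
          (tail.map (fun tk => (tk.1, pvClean (pvGet payload tk.2)))) = []
      · have hre : pvSectionsText payload tail == "" := by
          have : (pvSectionsText payload tail).toList = [] := by
            rw [ih, hrest, PySem.Str.toList_join]; simp
          simpa using String.toList_inj.mp (by simpa using this)
        rw [hrest]
        simp only [pvSectionsText, if_neg hbne, if_pos hre]
        rw [hblock, js_single]
      · have hrne : ¬ (pvSectionsText payload tail == "") := by
          intro hcontr
          have h0 : (pvSectionsText payload tail).toList = [] := by
            simp [eq_of_beq hcontr]
          rw [ih] at h0
          cases hcase : List.filterMap secBlock
              (tail.map (fun tk => (tk.1, pvClean (pvGet payload tk.2)))) with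
          | nil => exact hrest hcase
          | cons b bs =>
            rw [hcase, PySem.Str.toList_join, List.map_cons, jc_cons] at h0
            obtain ⟨hb0, _⟩ := List.append_eq_nil_iff.mp h0
            have hbmem : b ∈ List.filterMap secBlock
                (tail.map (fun tk => (tk.1, pvClean (pvGet payload tk.2)))) := by
              rw [hcase]; exact List.mem_cons_self
            obtain ⟨sec, hsecmem, hval⟩ := List.mem_filterMap.mp hbmem
            obtain ⟨tk', _, hsec⟩ := List.mem_map.mp hsecmem
            exact secBlock_toList_ne tk'.1 _ b (by rw [← hsec] at hval; exact hval) hb0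
        simp only [pvSectionsText, if_neg hbne, if_neg hrne]
        rw [String.toList_append, String.toList_append, hblock,
          js2_cons _ _ hrest, ← ih]
        have : ("\n\n" : String).toList = ['\n', '\n'] := by decide
        rw [this]
        simp [List.append_assoc]

-- B reduced to the section abstraction
lemma portB_eq (payload : List (String × List String)) :
    format_commitments_for_observer_py_alt payload
      = PySem.Str.join "\n\n" (List.filterMap secBlock
          [("Compromisos del estudiante", pvClean (pvGet payload "student_commitments")),
           ("Compromisos del acudiente", pvClean (pvGet payload "guardian_commitments")),
           ("Compromisos de la institución", pvClean (pvGet payload "institution_commitments"))]) := by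
  apply String.toList_inj.mp
  unfold format_commitments_for_observer_py_alt
  rw [pvSectionsText_toList]
  simp

-- ===== VERDICT (by name: the statement is the Claim_ definition above) =====
theorem format_commitments_for_observer_py_spec : Claim_equal_format_commitments_for_observer_py := by
  intro payload _hdom
  unfold Spec_format_commitments_for_observer_py
  rw [portA_eq, portB_eq]
  apply String.toList_inj.mp
  rw [PySem.Str.toList_strip, mainJoin]
  by_cases hB : List.filterMap secBlock
      [("Compromisos del estudiante", pvClean (pvGet payload "student_commitments")),
       ("Compromisos del acudiente", pvClean (pvGet payload "guardian_commitments")),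
       ("Compromisos de la institución", pvClean (pvGet payload "institution_commitments"))] = []
  · rw [if_pos hB, chars_strip_nil, hB, PySem.Str.toList_join]
    simp
  · rw [if_neg hB]
    apply strip_append_newline
    cases hBs : List.filterMap secBlock
        [("Compromisos del estudiante", pvClean (pvGet payload "student_commitments")),
         ("Compromisos del acudiente", pvClean (pvGet payload "guardian_commitments")),
         ("Compromisos de la institución", pvClean (pvGet payload "institution_commitments"))] with
    | nil => exact absurd hBs hB
    | cons b bs =>
      rw [PySem.Str.toList_join]
      have hsep2 : ("\n\n".toList : List Char) = ['\n', '\n'] := by decide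
      rw [hsep2]
      apply jc_good _ _ (by simp)
      intro y hy
      obtain ⟨z, hz, hzy⟩ := List.mem_map.mp hy
      subst hzy
      exact block_mem_good payload z (by rw [hBs]; exact hz)
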